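-- pv_equiv track=rewrite | github.com/CirclesUBI/path-visualizer | src/pathfinder.py | sort_args
-- ===== SOURCE A (Python) =====
-- def sort_args(tokenOwner, srcs, dests, wads):
-- 	tokenOwner_ = []
-- 	srcs_ = []
-- 	dests_ = []
-- 	wads_ = []
--
--
-- 	for i in range(len(tokenOwner)):
-- 		if tokenOwner[i] != dests[i] and tokenOwner[i] != srcs[i]:
-- 			tokenOwner_.append(tokenOwner[i])
-- 			srcs_.append(srcs[i])
-- 			dests_.append(dests[i])
-- 			wads_.append(wads[i])
--
--
-- 	for i in range(len(tokenOwner)):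
-- 		if tokenOwner[i] == srcs[i]:
-- 			tokenOwner_.append(tokenOwner[i])
-- 			srcs_.append(srcs[i])
-- 			dests_.append(dests[i])
-- 			wads_.append(wads[i])
-- 		elif tokenOwner[i] == dests[i]:
-- 			tokenOwner_.insert(0,tokenOwner[i])
-- 			srcs_.insert(0,srcs[i])
-- 			dests_.insert(0,dests[i])
-- 			wads_.insert(0,wads[i])
-- 	return tokenOwner_, srcs_, dests_, wads_
-- ===== SOURCE B (Python) =====
-- def sort_args(tokenOwner, srcs, dests, wads):
-- 	ft, fs, fd, fw = [], [], [], []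
-- 	mt, ms, md, mw = [], [], [], []
-- 	bt, bs, bd, bw = [], [], [], []
-- 	for i in range(len(tokenOwner)):
-- 		t = tokenOwner[i]
-- 		s = srcs[i]
-- 		d = dests[i]
-- 		w = wads[i]
-- 		if t == s:
-- 			bt.append(t); bs.append(s); bd.append(d); bw.append(w)
-- 		elif t == d:
-- 			ft.append(t); fs.append(s); fd.append(d); fw.append(w)
-- 		else:
-- 			mt.append(t); ms.append(s); md.append(d); mw.append(w)
-- 	ft.reverse(); fs.reverse(); fd.reverse(); fw.reverse()
-- 	return ft + mt + bt, fs + ms + bs, fd + md + bd, fw + mw + bw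
-- ===== Notes on version B (the rewrite author's own statement) =====
-- stated objective: faster
-- what changed: A makes two index-driven passes and uses insert(0, ...) on four parallel lists (each front-insertion is O(n)); B zips the rows once, distributes them into three buckets in a single pass with O(1) appends, reverses the dest-bucket and concatenates, then unzips.
import Mathlib
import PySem

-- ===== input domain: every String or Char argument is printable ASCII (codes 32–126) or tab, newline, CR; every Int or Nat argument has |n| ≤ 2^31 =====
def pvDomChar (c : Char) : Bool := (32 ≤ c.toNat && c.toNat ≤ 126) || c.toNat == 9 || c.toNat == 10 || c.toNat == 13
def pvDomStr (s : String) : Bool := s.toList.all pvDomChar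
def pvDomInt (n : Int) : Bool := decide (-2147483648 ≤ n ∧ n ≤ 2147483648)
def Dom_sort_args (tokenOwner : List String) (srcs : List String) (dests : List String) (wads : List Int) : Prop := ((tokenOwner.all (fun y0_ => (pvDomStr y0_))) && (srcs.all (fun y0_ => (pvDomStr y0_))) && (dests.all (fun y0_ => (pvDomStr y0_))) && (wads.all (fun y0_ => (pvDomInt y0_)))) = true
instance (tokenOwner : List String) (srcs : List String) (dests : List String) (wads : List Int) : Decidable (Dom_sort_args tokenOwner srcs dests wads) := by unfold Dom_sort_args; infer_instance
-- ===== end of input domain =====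

-- B replaces A's two index passes with quadratic insert(0,...) by one bucket pass over zipped rows (objective: faster).

-- ===== PORT A =====
-- literal transliteration of A: two passes over range(len(tokenOwner)), appending or
-- front-inserting into four parallel accumulator lists
def sort_args (tokenOwner : List String) (srcs : List String) (dests : List String) (wads : List Int) : List String × List String × List String × List Int :=
  let init : List String × List String × List String × List Int := ([], [], [], [])
  let st1 := (PySem.List.pyRange 0 (PySem.List.len tokenOwner) 1).foldl (fun st i =>
    let t := PySem.List.pyGetD tokenOwner i ""
    let d := PySem.List.pyGetD dests i ""
    let s := PySem.List.pyGetD srcs i ""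
    if t ≠ d ∧ t ≠ s then
      (st.1 ++ [t], st.2.1 ++ [s], st.2.2.1 ++ [d], st.2.2.2 ++ [PySem.List.pyGetD wads i 0])
    else st) init
  let st2 := (PySem.List.pyRange 0 (PySem.List.len tokenOwner) 1).foldl (fun st i =>
    let t := PySem.List.pyGetD tokenOwner i ""
    let s := PySem.List.pyGetD srcs i ""
    let d := PySem.List.pyGetD dests i ""
    let w := PySem.List.pyGetD wads i 0
    if t = s then
      (st.1 ++ [t], st.2.1 ++ [s], st.2.2.1 ++ [d], st.2.2.2 ++ [w])
    else if t = d then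
      ([t] ++ st.1, [s] ++ st.2.1, [d] ++ st.2.2.1, [w] ++ st.2.2.2)
    else st) st1
  st2

-- ===== PORT B =====
-- literal transliteration of B: one pass over the indices distributing each row's four
-- fields into three bucket groups (dest-front / middle / src-back), then reverse the
-- dest group and concatenate the groups
def sort_args_alt (tokenOwner : List String) (srcs : List String) (dests : List String) (wads : List Int) : List String × List String × List String × List Int :=
  let empty4 : List String × List String × List String × List Int := ([], [], [], [])
  let st := (PySem.List.pyRange 0 (PySem.List.len tokenOwner) 1).foldl (fun (st : (List String × List String × List String × List Int) × (List String × List String × List String × List Int) × (List String × List String × List String × List Int)) i =>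
    let t := PySem.List.pyGetD tokenOwner i ""
    let s := PySem.List.pyGetD srcs i ""
    let d := PySem.List.pyGetD dests i ""
    let w := PySem.List.pyGetD wads i 0
    if t = s then
      (st.1, st.2.1, (st.2.2.1 ++ [t], st.2.2.2.1 ++ [s], st.2.2.2.2.1 ++ [d], st.2.2.2.2.2 ++ [w]))
    else if t = d then
      ((st.1.1 ++ [t], st.1.2.1 ++ [s], st.1.2.2.1 ++ [d], st.1.2.2.2 ++ [w]), st.2.1, st.2.2)
    else
      (st.1, (st.2.1.1 ++ [t], st.2.1.2.1 ++ [s], st.2.1.2.2.1 ++ [d], st.2.1.2.2.2 ++ [w]), st.2.2)) (empty4, empty4, empty4)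
  (st.1.1.reverse ++ st.2.1.1 ++ st.2.2.1,
   st.1.2.1.reverse ++ st.2.1.2.1 ++ st.2.2.2.1,
   st.1.2.2.1.reverse ++ st.2.1.2.2.1 ++ st.2.2.2.2.1,
   st.1.2.2.2.reverse ++ st.2.1.2.2.2 ++ st.2.2.2.2.2)

-- ===== PRECONDITION & SPEC =====
-- Pre_ excludes exactly the inputs where A raises IndexError: some index below
-- len(tokenOwner) is out of range for srcs, dests or wads.
def Pre_sort_args (tokenOwner : List String) (srcs : List String) (dests : List String) (wads : List Int) : Prop :=
  tokenOwner.length ≤ srcs.length ∧ tokenOwner.length ≤ dests.length ∧ tokenOwner.length ≤ wads.length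
instance (tokenOwner : List String) (srcs : List String) (dests : List String) (wads : List Int) : Decidable (Pre_sort_args tokenOwner srcs dests wads) := by unfold Pre_sort_args; infer_instance
def pvWitness_sort_args : List String × List String × List String × List Int := (["a"], ["b"], ["c"], [1])

def Spec_sort_args (tokenOwner : List String) (srcs : List String) (dests : List String) (wads : List Int) (out : List String × List String × List String × List Int) : Prop := out = sort_args_alt tokenOwner srcs dests wads
instance (tokenOwner : List String) (srcs : List String) (dests : List String) (wads : List Int) (out : List String × List String × List String × List Int) : Decidable (Spec_sort_args tokenOwner srcs dests wads out) := by unfold Spec_sort_args; infer_instance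

-- ===== CLAIM (what is proved, stated in full; the proofs are below) =====
def Claim_equal_sort_args : Prop := ∀ (tokenOwner : List String) (srcs : List String) (dests : List String) (wads : List Int), Dom_sort_args tokenOwner srcs dests wads → Pre_sort_args tokenOwner srcs dests wads → Spec_sort_args tokenOwner srcs dests wads (sort_args tokenOwner srcs dests wads)

-- ===== LEMMAS AND PROOFS =====

-- abbreviations for the proofs
def zip4 : List String → List String → List String → List Int → List (String × String × String × Int)
  | t :: ts, s :: ss, d :: ds, w :: ws => (t, s, d, w) :: zip4 ts ss ds ws
  | _, _, _, _ => []

def Row : Type := String × String × String × Int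
def St4 : Type := List String × List String × List String × List Int

def app4 (st : St4) (r : Row) : St4 :=
  (st.1 ++ [r.1], st.2.1 ++ [r.2.1], st.2.2.1 ++ [r.2.2.1], st.2.2.2 ++ [r.2.2.2])

def gA1 (st : St4) (r : Row) : St4 :=
  if r.1 ≠ r.2.2.1 ∧ r.1 ≠ r.2.1 then app4 st r else st

def gA2 (st : St4) (r : Row) : St4 :=
  if r.1 = r.2.1 then app4 st r
  else if r.1 = r.2.2.1 then
    ([r.1] ++ st.1, [r.2.1] ++ st.2.1, [r.2.2.1] ++ st.2.2.1, [r.2.2.2] ++ st.2.2.2)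
  else st

def psrc (r : Row) : Bool := r.1 == r.2.1
def pdst (r : Row) : Bool := !(r.1 == r.2.1) && (r.1 == r.2.2.1)
def pmid (r : Row) : Bool := !(r.1 == r.2.2.1) && !(r.1 == r.2.1)

def gB (st : St4 × St4 × St4) (r : Row) : St4 × St4 × St4 :=
  if r.1 = r.2.1 then (st.1, st.2.1, app4 st.2.2 r)
  else if r.1 = r.2.2.1 then (app4 st.1 r, st.2.1, st.2.2)
  else (st.1, app4 st.2.1 r, st.2.2)

theorem zip4_nil (ss ds : List String) (ws : List Int) : zip4 [] ss ds ws = [] := by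
  cases ss <;> cases ds <;> cases ws <;> rfl

theorem zip4_cons (t s d : String) (w : Int) (ts ss ds : List String) (ws : List Int) :
    zip4 (t :: ts) (s :: ss) (d :: ds) (w :: ws) = (t, s, d, w) :: zip4 ts ss ds ws := rfl

theorem rangeFoldAux {σ : Type} (g : σ → Row → σ) :
    ∀ (n k : Nat) (tO ss ds : List String) (ws : List Int) (init : σ),
      k + n = tO.length → tO.length ≤ ss.length → tO.length ≤ ds.length → tO.length ≤ ws.length →
      (PySem.List.pyRange (k : Int) (tO.length : Int) 1).foldl
          (fun st i => g st (PySem.List.pyGetD tO i "", PySem.List.pyGetD ss i "",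
                             PySem.List.pyGetD ds i "", PySem.List.pyGetD ws i 0)) init
        = (zip4 (tO.drop k) (ss.drop k) (ds.drop k) (ws.drop k)).foldl g init := by
  intro n
  induction n with
  | zero =>
    intro k tO ss ds ws init hk h1 h2 h3
    have hkk : k = tO.length := by omega
    rw [PySem.List.pyRange_one_eq_nil (by exact_mod_cast Nat.le_of_eq hkk.symm)]
    rw [hkk, List.drop_length, zip4_nil]
    rfl
  | succ n ih =>
    intro k tO ss ds ws init hk h1 h2 h3
    have hlt : k < tO.length := by omega
    rw [PySem.List.pyRange_one_cons (by exact_mod_cast hlt)]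
    rw [List.foldl_cons]
    have e1 : PySem.List.pyGetD tO (k : Int) "" = tO[k]'hlt := by
      rw [PySem.List.pyGetD_natCast, List.getD_eq_getElem _ _ hlt]
    have e2 : PySem.List.pyGetD ss (k : Int) "" = ss[k]'(by omega) := by
      rw [PySem.List.pyGetD_natCast, List.getD_eq_getElem _ _ (by omega)]
    have e3 : PySem.List.pyGetD ds (k : Int) "" = ds[k]'(by omega) := by
      rw [PySem.List.pyGetD_natCast, List.getD_eq_getElem _ _ (by omega)]
    have e4 : PySem.List.pyGetD ws (k : Int) 0 = ws[k]'(by omega) := by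
      rw [PySem.List.pyGetD_natCast, List.getD_eq_getElem _ _ (by omega)]
    rw [e1, e2, e3, e4]
    have hcast : (k : Int) + 1 = ((k + 1 : Nat) : Int) := by push_cast; ring
    rw [hcast, ih (k + 1) tO ss ds ws _ (by omega) h1 h2 h3]
    rw [List.drop_eq_getElem_cons hlt, List.drop_eq_getElem_cons (show k < ss.length by omega),
        List.drop_eq_getElem_cons (show k < ds.length by omega),
        List.drop_eq_getElem_cons (show k < ws.length by omega), zip4_cons]
    rfl

theorem rangeFold {σ : Type} (g : σ → Row → σ) (tO ss ds : List String) (ws : List Int) (init : σ)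
    (h1 : tO.length ≤ ss.length) (h2 : tO.length ≤ ds.length) (h3 : tO.length ≤ ws.length) :
    (PySem.List.pyRange 0 (tO.length : Int) 1).foldl
        (fun st i => g st (PySem.List.pyGetD tO i "", PySem.List.pyGetD ss i "",
                           PySem.List.pyGetD ds i "", PySem.List.pyGetD ws i 0)) init
      = (zip4 tO ss ds ws).foldl g init := by
  simpa using rangeFoldAux g tO.length 0 tO ss ds ws init (by omega) h1 h2 h3

theorem gA1_fold : ∀ (l : List Row) (a b c : List String) (d : List Int),
    l.foldl gA1 (a, b, c, d) =
      (a ++ (l.filter pmid).map (fun r => r.1), b ++ (l.filter pmid).map (fun r => r.2.1),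
       c ++ (l.filter pmid).map (fun r => r.2.2.1), d ++ (l.filter pmid).map (fun r => r.2.2.2)) := by
  intro l
  induction l with
  | nil => simp
  | cons r t ih =>
    intro a b c d
    rcases r with ⟨t1, s1, d1, w1⟩
    by_cases h1 : t1 = s1
    · simp [gA1, pmid, h1, ih]
    · by_cases h2 : t1 = d1
      · have hb1 : (t1 == s1) = false := by simp [h1]
        have hb2 : (t1 == d1) = true := by simp [h2]
        have hp1 : (t1 = s1) = False := eq_false h1
        have hp2 : (t1 = d1) = True := eq_true h2
        simp [gA1, pmid, hp1, hp2, hb1, hb2, ih]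
      · simp [gA1, app4, pmid, h1, h2, ih, List.append_assoc]

theorem gA2_fold : ∀ (l : List Row) (a b c : List String) (d : List Int),
    l.foldl gA2 (a, b, c, d) =
      (((l.filter pdst).map (fun r => r.1)).reverse ++ a ++ (l.filter psrc).map (fun r => r.1),
       ((l.filter pdst).map (fun r => r.2.1)).reverse ++ b ++ (l.filter psrc).map (fun r => r.2.1),
       ((l.filter pdst).map (fun r => r.2.2.1)).reverse ++ c ++ (l.filter psrc).map (fun r => r.2.2.1),
       ((l.filter pdst).map (fun r => r.2.2.2)).reverse ++ d ++ (l.filter psrc).map (fun r => r.2.2.2)) := by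
  intro l
  induction l with
  | nil => simp
  | cons r t ih =>
    intro a b c d
    rcases r with ⟨t1, s1, d1, w1⟩
    by_cases h1 : t1 = s1
    · simp [gA2, app4, pdst, psrc, h1, ih, List.append_assoc]
    · by_cases h2 : t1 = d1
      · have hb1 : (t1 == s1) = false := by simp [h1]
        have hb2 : (t1 == d1) = true := by simp [h2]
        have hp1 : (t1 = s1) = False := eq_false h1
        have hp2 : (t1 = d1) = True := eq_true h2
        simp [gA2, pdst, psrc, hp1, hp2, hb1, hb2, ih, List.append_assoc]
      · simp [gA2, pdst, psrc, h1, h2, ih, List.append_assoc]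

def gFilt (p : Row → Bool) (st : St4) (r : Row) : St4 :=
  if p r then app4 st r else st

theorem gFilt_fold (p : Row → Bool) : ∀ (l : List Row) (F : St4),
    l.foldl (gFilt p) F =
      (F.1 ++ (l.filter p).map (fun r => r.1), F.2.1 ++ (l.filter p).map (fun r => r.2.1),
       F.2.2.1 ++ (l.filter p).map (fun r => r.2.2.1), F.2.2.2 ++ (l.filter p).map (fun r => r.2.2.2)) := by
  intro l
  induction l with
  | nil => intro F; simp
  | cons r t ih =>
    intro F
    by_cases h : p r <;> simp [gFilt, app4, h, ih, List.append_assoc]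

theorem gB_split : ∀ (l : List Row) (F M B : St4),
    l.foldl gB (F, M, B) = (l.foldl (gFilt pdst) F, l.foldl (gFilt pmid) M, l.foldl (gFilt psrc) B) := by
  intro l
  induction l with
  | nil => intro F M B; rfl
  | cons r t ih =>
    intro F M B
    have h : gB (F, M, B) r = (gFilt pdst F r, gFilt pmid M r, gFilt psrc B r) := by
      rcases r with ⟨t1, s1, d1, w1⟩
      by_cases h1 : t1 = s1
      · simp [gB, gFilt, pdst, pmid, psrc, h1]
      · by_cases h2 : t1 = d1
        · have hb1 : (t1 == s1) = false := by simp [h1]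
          have hb2 : (t1 == d1) = true := by simp [h2]
          have hp1 : (t1 = s1) = False := eq_false h1
          have hp2 : (t1 = d1) = True := eq_true h2
          simp [gB, gFilt, pdst, pmid, psrc, hp1, hp2, hb1, hb2]
        · simp [gB, gFilt, pdst, pmid, psrc, h1, h2]
    rw [List.foldl_cons, h, ih]
    rfl

theorem A_norm (tO ss ds : List String) (ws : List Int)
    (h1 : tO.length ≤ ss.length) (h2 : tO.length ≤ ds.length) (h3 : tO.length ≤ ws.length) :
    sort_args tO ss ds ws
      = (zip4 tO ss ds ws).foldl gA2 ((zip4 tO ss ds ws).foldl gA1 ([], [], [], [])) := by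
  show (PySem.List.pyRange 0 (PySem.List.len tO) 1).foldl
        (fun st i => gA2 st (PySem.List.pyGetD tO i "", PySem.List.pyGetD ss i "",
                             PySem.List.pyGetD ds i "", PySem.List.pyGetD ws i 0))
        ((PySem.List.pyRange 0 (PySem.List.len tO) 1).foldl
          (fun st i => gA1 st (PySem.List.pyGetD tO i "", PySem.List.pyGetD ss i "",
                               PySem.List.pyGetD ds i "", PySem.List.pyGetD ws i 0)) ([], [], [], []))
      = _
  rw [show PySem.List.len tO = (tO.length : Int) from PySem.List.len_eq tO]
  rw [rangeFold gA1 tO ss ds ws _ h1 h2 h3, rangeFold gA2 tO ss ds ws _ h1 h2 h3]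

theorem B_norm (tO ss ds : List String) (ws : List Int)
    (h1 : tO.length ≤ ss.length) (h2 : tO.length ≤ ds.length) (h3 : tO.length ≤ ws.length) :
    sort_args_alt tO ss ds ws
      = ((((zip4 tO ss ds ws).filter pdst).map (fun r => r.1)).reverse
           ++ ((zip4 tO ss ds ws).filter pmid).map (fun r => r.1)
           ++ ((zip4 tO ss ds ws).filter psrc).map (fun r => r.1),
         (((zip4 tO ss ds ws).filter pdst).map (fun r => r.2.1)).reverse
           ++ ((zip4 tO ss ds ws).filter pmid).map (fun r => r.2.1)
           ++ ((zip4 tO ss ds ws).filter psrc).map (fun r => r.2.1),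
         (((zip4 tO ss ds ws).filter pdst).map (fun r => r.2.2.1)).reverse
           ++ ((zip4 tO ss ds ws).filter pmid).map (fun r => r.2.2.1)
           ++ ((zip4 tO ss ds ws).filter psrc).map (fun r => r.2.2.1),
         (((zip4 tO ss ds ws).filter pdst).map (fun r => r.2.2.2)).reverse
           ++ ((zip4 tO ss ds ws).filter pmid).map (fun r => r.2.2.2)
           ++ ((zip4 tO ss ds ws).filter psrc).map (fun r => r.2.2.2)) := by
  show (let st := (PySem.List.pyRange 0 (PySem.List.len tO) 1).foldl
          (fun st i => gB st (PySem.List.pyGetD tO i "", PySem.List.pyGetD ss i "",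
                              PySem.List.pyGetD ds i "", PySem.List.pyGetD ws i 0))
          (([], [], [], []), ([], [], [], []), ([], [], [], []))
        (st.1.1.reverse ++ st.2.1.1 ++ st.2.2.1,
         st.1.2.1.reverse ++ st.2.1.2.1 ++ st.2.2.2.1,
         st.1.2.2.1.reverse ++ st.2.1.2.2.1 ++ st.2.2.2.2.1,
         st.1.2.2.2.reverse ++ st.2.1.2.2.2 ++ st.2.2.2.2.2)) = _
  rw [show PySem.List.len tO = (tO.length : Int) from PySem.List.len_eq tO]
  rw [rangeFold gB tO ss ds ws _ h1 h2 h3]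
  rw [gB_split, gFilt_fold, gFilt_fold, gFilt_fold]
  simp

theorem sort_args_spec : Claim_equal_sort_args := by
  intro tO ss ds ws _ hPre
  obtain ⟨h1, h2, h3⟩ := hPre
  unfold Spec_sort_args
  rw [A_norm tO ss ds ws h1 h2 h3, B_norm tO ss ds ws h1 h2 h3]
  rw [gA1_fold, gA2_fold]
  simp
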